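-- pv_equiv track=rewrite | github.com/userWZ/drl_fjssp | env/base_env.py | insert_task
-- ===== SOURCE A (Python) =====
-- import copy
--
-- def insert_task(machine_occupied_times_true, task_id, job_task_ready_time, task_duration):
--     """
--     根据机器被占用的时间，考虑将task插入到什么位置
--
--     Args:
--         machine_occupied_times (List): task所对应机器被占用的时间段
--         task_id (int): task的id
--         job_task_ready_time (int): task前序task的结束时间
--         task_duration (_type_):  task持续时间
--     Returns:
--         inserted: 是否被插入
--         start_time: 计算得到的task的开始时间
--         insert_pos: 插入位置（如果为-1则直接安排到末尾）
--     """
--     # 寻找可用的插入空隙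
--     # 记录机器被task占用的时间段, list of tuples,  [[(task,起始时间,结束时间),...],[],[],...]
--     machine_occupied_times = copy.deepcopy(machine_occupied_times_true)
--     insert_pos = -1
--     inserted = False
--     for i, (id, ostart, oend) in enumerate(machine_occupied_times):
--         if ostart > job_task_ready_time:
--             insert_pos = i
--             break
--
--     # 机器中开始时间没有晚于当前task开始时间，直接放到最后情况下，task的start_time
--     machine_ready_time = 0
--     if len(machine_occupied_times) > 0:
--         machine_ready_time = machine_occupied_times[-1][2]
--     start_time = max(machine_ready_time, job_task_ready_time)
--
--     if insert_pos == -1: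
--         # 机器中开始时间没有晚于当前task开始时间的，直接放到最后
--         return False, start_time, -1
--
--     # 添加虚拟的时间片段,方便间隔计算
--     machine_occupied_times.insert(insert_pos, (task_id, job_task_ready_time, job_task_ready_time + task_duration))
--
--     # 计算可用的空闲间隔
--     for i in range(insert_pos, len(machine_occupied_times) - 1):
--         # 对于后续位置，计算每个位置之间的时间间隔
--         if i == insert_pos:
--             start_time = max(machine_occupied_times[i][1], machine_occupied_times[i - 1][2] if i > 0 else 0)
--         else:
--             start_time = machine_occupied_times[i][2]
--         gap = machine_occupied_times[i + 1][1] - start_time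
--         # 判断空闲间隔是否足够当前task执行
--         if gap >= task_duration:
--             inserted = True
--             return inserted, start_time, i
--
--     # inserted为False,机器中没有足够的空闲时间片段,放到最后
--     return inserted, start_time, -1
-- ===== SOURCE B (Python) =====
-- def insert_task(machine_occupied_times_true, task_id, job_task_ready_time, task_duration):
--     """Single pass over the original schedule: no deepcopy, no virtual insert.
--     Phase 1 skips intervals starting at or before the ready time (tracking the
--     previous end); once the first interval starting strictly later is found,
--     every following gap is checked directly."""
--     prev_end = 0
--     start = None
--     found = False
--     for i, (_id, s, _e) in enumerate(machine_occupied_times_true):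
--         if found:
--             start = prev_end
--         elif s > job_task_ready_time:
--             found = True
--             start = max(prev_end, job_task_ready_time)
--         else:
--             prev_end = _e
--             continue
--         if s - start >= task_duration:
--             return True, start, i
--         prev_end = _e
--     if not found:
--         return False, max(prev_end, job_task_ready_time), -1
--     return False, start, -1
-- ===== Notes on version B (the rewrite author's own statement) =====
-- stated objective: simpler
-- what changed: Replaces A's deepcopy + first scan for insert_pos + virtual insertion of the task into a copied list + index-based gap loop with one direct pass over the original list: a two-phase accumulator loop (skip intervals not later than the ready time, then check each gap), no copy and no list mutation.
import Mathlib
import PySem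

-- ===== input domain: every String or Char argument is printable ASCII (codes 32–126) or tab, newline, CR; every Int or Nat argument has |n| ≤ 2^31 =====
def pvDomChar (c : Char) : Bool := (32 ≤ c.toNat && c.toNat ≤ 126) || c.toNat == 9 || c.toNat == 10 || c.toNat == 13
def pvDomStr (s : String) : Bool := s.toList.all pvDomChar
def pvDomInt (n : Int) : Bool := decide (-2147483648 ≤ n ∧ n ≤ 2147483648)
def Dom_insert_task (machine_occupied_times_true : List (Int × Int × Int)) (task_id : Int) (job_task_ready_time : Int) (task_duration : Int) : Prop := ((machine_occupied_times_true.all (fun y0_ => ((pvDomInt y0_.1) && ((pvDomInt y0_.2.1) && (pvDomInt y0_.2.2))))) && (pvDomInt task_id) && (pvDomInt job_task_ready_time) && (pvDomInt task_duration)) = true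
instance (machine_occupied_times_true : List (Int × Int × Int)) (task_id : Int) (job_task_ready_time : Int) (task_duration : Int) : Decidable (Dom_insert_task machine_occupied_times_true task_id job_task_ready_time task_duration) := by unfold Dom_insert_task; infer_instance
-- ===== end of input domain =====

-- B replaces A's deepcopy + separate insert-position scan + virtual insertion into a copied
-- list + index-based gap loop by one direct two-phase pass over the original list (simpler,
-- no copy, no mutation).  Return values are proved identical on all inputs.

-- ===== PORT A =====

-- A's first loop: first index whose start is > ready (break), else -1.
def pvA_findPos (ready : Int) : List (Int × Int × Int) → Int → Int
  | [], _ => -1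
  | (_, ostart, _) :: rest, i => if ostart > ready then i else pvA_findPos ready rest (i + 1)

-- A's second loop: for i in range(insert_pos, len(ys)-1), indexing ys; start_time threads through.
-- Indexing uses pyGet? with a junk default; every access is in range for the loop's bounds.
def pvA_loop (ys : List (Int × Int × Int)) (insert_pos : Nat) (task_duration : Int)
    (i : Nat) (start_time : Int) : Bool × Int × Int :=
  if h : i < ys.length - 1 then
    let st : Int :=
      if i = insert_pos then
        max ((PySem.List.pyGet? ys (i : Int)).getD (0, 0, 0)).2.1
            (if i > 0 then ((PySem.List.pyGet? ys ((i : Int) - 1)).getD (0, 0, 0)).2.2 else 0)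
      else ((PySem.List.pyGet? ys (i : Int)).getD (0, 0, 0)).2.2
    let gap : Int := ((PySem.List.pyGet? ys ((i : Int) + 1)).getD (0, 0, 0)).2.1 - st
    if gap ≥ task_duration then (true, st, (i : Int))
    else pvA_loop ys insert_pos task_duration (i + 1) st
  else (false, start_time, -1)
termination_by ys.length - i
decreasing_by omega

def insert_task (machine_occupied_times_true : List (Int × Int × Int)) (task_id : Int) (job_task_ready_time : Int) (task_duration : Int) : Bool × Int × Int :=
  let machine_occupied_times := machine_occupied_times_true   -- copy.deepcopy
  let insert_pos : Int := pvA_findPos job_task_ready_time machine_occupied_times 0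
  let machine_ready_time : Int :=
    if machine_occupied_times.length > 0 then
      ((PySem.List.pyGet? machine_occupied_times (-1)).getD (0, 0, 0)).2.2
    else 0
  let start_time := max machine_ready_time job_task_ready_time
  if insert_pos = -1 then (false, start_time, -1)
  else
    let ys := PySem.List.insert machine_occupied_times insert_pos
      (task_id, job_task_ready_time, job_task_ready_time + task_duration)
    pvA_loop ys insert_pos.toNat task_duration insert_pos.toNat start_time

-- ===== PORT B =====

-- B's loop after the first later-starting interval was found ('found' phase): check each gap.
def pvB_after (ready task_duration : Int) : List (Int × Int × Int) → Nat → Int → Int → Bool × Int × Int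
  | [], _, _, start => (false, start, -1)
  | (_, s, e) :: rest, i, prev_end, _ =>
    if s - prev_end ≥ task_duration then (true, prev_end, (i : Int))
    else pvB_after ready task_duration rest (i + 1) e prev_end

-- B's loop before any later-starting interval was found: skip, tracking the previous end.
def pvB_scan (ready task_duration : Int) : List (Int × Int × Int) → Nat → Int → Bool × Int × Int
  | [], _, prev_end => (false, max prev_end ready, -1)
  | (_, s, e) :: rest, i, prev_end =>
    if s > ready then
      let start := max prev_end ready
      if s - start ≥ task_duration then (true, start, (i : Int))
      else pvB_after ready task_duration rest (i + 1) e start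
    else pvB_scan ready task_duration rest (i + 1) e

def insert_task_alt (machine_occupied_times_true : List (Int × Int × Int)) (task_id : Int) (job_task_ready_time : Int) (task_duration : Int) : Bool × Int × Int :=
  pvB_scan job_task_ready_time task_duration machine_occupied_times_true 0 0

-- ===== PRECONDITION & SPEC =====
def Spec_insert_task (machine_occupied_times_true : List (Int × Int × Int)) (task_id : Int) (job_task_ready_time : Int) (task_duration : Int) (out : Bool × Int × Int) : Prop := out = insert_task_alt machine_occupied_times_true task_id job_task_ready_time task_duration
instance (machine_occupied_times_true : List (Int × Int × Int)) (task_id : Int) (job_task_ready_time : Int) (task_duration : Int) (out : Bool × Int × Int) : Decidable (Spec_insert_task machine_occupied_times_true task_id job_task_ready_time task_duration out) := by unfold Spec_insert_task; infer_instance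

-- ===== CLAIM (what is proved, stated in full; the proofs are below) =====
def Claim_equal_insert_task : Prop := ∀ (machine_occupied_times_true : List (Int × Int × Int)) (task_id : Int) (job_task_ready_time : Int) (task_duration : Int), Dom_insert_task machine_occupied_times_true task_id job_task_ready_time task_duration → Spec_insert_task machine_occupied_times_true task_id job_task_ready_time task_duration (insert_task machine_occupied_times_true task_id job_task_ready_time task_duration)

-- ===== LEMMAS AND PROOFS =====

-- Any (Int × Int × Int) with all components ≤ 2^31 is irrelevant; proofs below never use Dom.

-- the 'previous end' accumulated by skipping a prefix (0 initially)
def pvLastEnd (l : List (Int × Int × Int)) (prev : Int) : Int :=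
  l.foldl (fun _ x => x.2.2) prev

theorem pvLastEnd_nil (prev : Int) : pvLastEnd [] prev = prev := rfl

theorem pvLastEnd_cons (x : Int × Int × Int) (l : List (Int × Int × Int)) (prev : Int) :
    pvLastEnd (x :: l) prev = pvLastEnd l x.2.2 := rfl

theorem pvLastEnd_getLast? (l : List (Int × Int × Int)) (prev : Int) (d : Int × Int × Int) :
    pvLastEnd l prev = if l = [] then prev else ((l.getLast?).getD d).2.2 := by
  induction l generalizing prev with
  | nil => rfl
  | cons x xs ih =>
    rw [pvLastEnd_cons, ih]
    cases xs with
    | nil => simp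
    | cons y ys => simp [List.getLast?_cons_cons]

-- characterisation of A's first loop via takeWhile/dropWhile
theorem pvA_findPos_eq (ready : Int) (l : List (Int × Int × Int)) (i : Nat) :
    pvA_findPos ready l i =
      if l.dropWhile (fun x => decide (x.2.1 ≤ ready)) = [] then -1
      else ((i + (l.takeWhile (fun x => decide (x.2.1 ≤ ready))).length : Nat) : Int) := by
  induction l generalizing i with
  | nil => rfl
  | cons x xs ih =>
    show (if x.2.1 > ready then (i : Int) else pvA_findPos ready xs (i + 1)) = _
    by_cases h : x.2.1 ≤ ready
    · have hc : (i : Int) + 1 = ((i + 1 : Nat) : Int) := by push_cast; ring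
      have hd : (x :: xs).dropWhile (fun x => decide (x.2.1 ≤ ready))
          = xs.dropWhile (fun x => decide (x.2.1 ≤ ready)) := by
        simp [h]
      have ht : (x :: xs).takeWhile (fun x => decide (x.2.1 ≤ ready))
          = x :: xs.takeWhile (fun x => decide (x.2.1 ≤ ready)) := by
        simp [h]
      rw [if_neg (by omega), hc, ih (i + 1), hd, ht]
      split
      · rfl
      · simp [List.length_cons]; ring
    · rw [if_pos (by omega)]
      simp [h]

theorem pvA_findPos_zero (ready : Int) (l : List (Int × Int × Int)) :
    pvA_findPos ready l 0 =
      if l.dropWhile (fun x => decide (x.2.1 ≤ ready)) = [] then -1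
      else (((l.takeWhile (fun x => decide (x.2.1 ≤ ready))).length : Nat) : Int) := by
  have := pvA_findPos_eq ready l 0
  simpa using this

theorem pv_dropWhile_head_false {p : (Int × Int × Int) → Bool} {l : List (Int × Int × Int)}
    {x : Int × Int × Int} {xs : List (Int × Int × Int)}
    (h : l.dropWhile p = x :: xs) : p x = false := by
  induction l with
  | nil => simp at h
  | cons y ys ih =>
    rw [List.dropWhile_cons] at h
    by_cases hp : p y
    · rw [if_pos hp] at h; exact ih h
    · rw [if_neg hp] at h
      cases h
      simpa using hp

-- B skips a prefix of not-later-starting intervals, accumulating the previous end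
theorem pvB_scan_skip (ready dur : Int) (pre : List (Int × Int × Int)) :
    ∀ (l : List (Int × Int × Int)) (i : Nat) (prev : Int),
    (∀ x ∈ pre, x.2.1 ≤ ready) →
    pvB_scan ready dur (pre ++ l) i prev = pvB_scan ready dur l (i + pre.length) (pvLastEnd pre prev) := by
  induction pre with
  | nil => intro l i prev _; simp [pvLastEnd_nil]
  | cons x xs ih =>
    intro l i prev hall
    obtain ⟨id, s, e⟩ := x
    have hs : s ≤ ready := hall (id, s, e) (List.mem_cons_self ..)
    show pvB_scan ready dur ((id, s, e) :: (xs ++ l)) i prev = _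
    rw [pvB_scan, if_neg (by omega), ih l (i + 1) e (fun y hy => hall y (List.mem_cons_of_mem _ hy))]
    rw [pvLastEnd_cons]
    congr 1
    simp; omega

-- the tail phase: A's index loop past insert_pos equals B's 'found' loop on the remaining suffix
theorem pv_loop_after (ready dur : Int) (ys : List (Int × Int × Int)) (p : Nat) :
    ∀ (l : List (Int × Int × Int)) (i : Nat) (st prev : Int),
    p < i → ys.drop (i + 1) = l →
    (l ≠ [] → ((PySem.List.pyGet? ys (i : Int)).getD (0, 0, 0)).2.2 = prev) →
    pvA_loop ys p dur i st = pvB_after ready dur l i prev st := by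
  intro l
  induction l with
  | nil =>
    intro i st prev hpi hdrop _
    have hlen : ys.length ≤ i + 1 := by
      by_contra h
      have := List.drop_eq_nil_iff.mp hdrop
      omega
    rw [pvA_loop, dif_neg (by omega)]
    rfl
  | cons x rest ih =>
    intro i st prev hpi hdrop hprev
    obtain ⟨id, s, e⟩ := x
    have hlen : i + 1 < ys.length := by
      by_contra h
      rw [List.drop_eq_nil_iff.mpr (by omega)] at hdrop
      exact absurd hdrop (by simp)
    have hx : ys[i + 1]? = some (id, s, e) := by
      have : (ys.drop (i + 1))[0]? = some (id, s, e) := by rw [hdrop]; rfl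
      simpa using this
    have hget1 : (PySem.List.pyGet? ys ((i : Int) + 1)).getD (0, 0, 0) = (id, s, e) := by
      have : ((i : Int) + 1) = ((i + 1 : Nat) : Int) := by push_cast; ring
      rw [this, PySem.List.pyGet?_natCast, hx]; rfl
    rw [pvA_loop, dif_pos (by omega)]
    simp only [if_neg (by omega : ¬ i = p), hget1, hprev (by simp)]
    show (if s - prev ≥ dur then (true, prev, (i : Int)) else pvA_loop ys p dur (i + 1) prev)
       = pvB_after ready dur ((id, s, e) :: rest) i prev st
    rw [pvB_after]
    split
    · rfl
    · apply ih (i + 1) prev e (by omega)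
      · rw [← List.drop_drop, hdrop]; rfl
      · intro _
        have : ((i + 1 : Nat) : Int) = (i : Int) + 1 := by push_cast; ring
        rw [this, hget1]

-- ===== VERDICT (by name: the statement is the Claim_ definition above) =====
theorem insert_task_spec : Claim_equal_insert_task := by
  intro mot tid ready dur _
  unfold Spec_insert_task insert_task insert_task_alt
  dsimp only
  rw [pvA_findPos_zero]
  by_cases hD : mot.dropWhile (fun x => decide (x.2.1 ≤ ready)) = []
  · -- no interval starts after the ready time: both append at the end
    rw [if_pos hD, if_pos rfl]
    have hall : ∀ x ∈ mot, x.2.1 ≤ ready := by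
      have := List.dropWhile_eq_nil_iff.mp hD
      intro x hx; simpa using this x hx
    have hskip := pvB_scan_skip ready dur mot [] 0 0 hall
    rw [List.append_nil] at hskip
    rw [hskip]
    show (false, _, -1) = (false, max (pvLastEnd mot 0) ready, (-1 : Int))
    rw [pvLastEnd_getLast? mot 0 (0, 0, 0)]
    by_cases hm : mot = []
    · subst hm; simp
    · rw [if_neg hm]
      have hlen : mot.length > 0 := List.length_pos_iff.mpr hm
      rw [if_pos hlen, PySem.List.pyGet?_neg_one]
  · -- some interval starts after the ready time
    obtain ⟨cur, suf, hds⟩ : ∃ c s, mot.dropWhile (fun x => decide (x.2.1 ≤ ready)) = c :: s := by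
      cases h : mot.dropWhile (fun x => decide (x.2.1 ≤ ready)) with
      | nil => exact absurd h hD
      | cons c s => exact ⟨c, s, rfl⟩
    obtain ⟨cid, cs, ce⟩ := cur
    have hcs : ready < cs := by
      have := pv_dropWhile_head_false hds
      simpa using this
    have hmot : mot.takeWhile (fun x => decide (x.2.1 ≤ ready)) ++ (cid, cs, ce) :: suf = mot := by
      rw [← hds]; exact List.takeWhile_append_dropWhile
    set pre := mot.takeWhile (fun x => decide (x.2.1 ≤ ready)) with hpre
    have hallpre : ∀ x ∈ pre, x.2.1 ≤ ready := by
      intro x hx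
      have := List.mem_takeWhile_imp hx
      simpa using this
    rw [if_neg hD]
    rw [if_neg (by omega : ¬ ((pre.length : Nat) : Int) = -1)]
    have hplen : pre.length ≤ mot.length := by rw [← hmot]; simp
    have hys : PySem.List.insert mot ((pre.length : Nat) : Int) (tid, ready, ready + dur)
        = pre ++ (tid, ready, ready + dur) :: (cid, cs, ce) :: suf := by
      rw [PySem.List.insert_natCast mot pre.length _ hplen]
      conv_lhs => rw [← hmot]
      rw [List.take_left, List.drop_left]
    rw [hys, Int.toNat_natCast]
    have hylen : (pre ++ (tid, ready, ready + dur) :: (cid, cs, ce) :: suf).length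
        = pre.length + 2 + suf.length := by
      simp [List.length_append, List.length_cons]; omega
    rw [pvA_loop, dif_pos (by rw [hylen]; omega), if_pos rfl]
    have hget_p : PySem.List.pyGet? (pre ++ (tid, ready, ready + dur) :: (cid, cs, ce) :: suf)
        ((pre.length : Nat) : Int) = some (tid, ready, ready + dur) :=
      PySem.List.pyGet?_append_length _ _ _
    have hget_p1 : PySem.List.pyGet? (pre ++ (tid, ready, ready + dur) :: (cid, cs, ce) :: suf)
        (((pre.length : Nat) : Int) + 1) = some (cid, cs, ce) := by
      have he : pre ++ (tid, ready, ready + dur) :: (cid, cs, ce) :: suf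
          = (pre ++ [(tid, ready, ready + dur)]) ++ (cid, cs, ce) :: suf := by simp
      have hl : ((pre.length : Nat) : Int) + 1 = (((pre ++ [(tid, ready, ready + dur)]).length : Nat) : Int) := by
        simp
      rw [he, hl]
      exact PySem.List.pyGet?_append_length _ _ _
    have hprevterm : (if pre.length > 0 then
        ((PySem.List.pyGet? (pre ++ (tid, ready, ready + dur) :: (cid, cs, ce) :: suf)
          (((pre.length : Nat) : Int) - 1)).getD (0, 0, 0)).2.2 else 0) = pvLastEnd pre 0 := by
      by_cases hp0 : pre = []
      · rw [hp0]; simp [pvLastEnd_nil]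
      · have hlp : 0 < pre.length := List.length_pos_iff.mpr hp0
        rw [if_pos hlp]
        have h1 : ((pre.length : Nat) : Int) - 1 = ((pre.length - 1 : Nat) : Int) := by push_cast [hlp]; omega
        rw [h1, PySem.List.pyGet?_natCast]
        rw [List.getElem?_append_left (by omega : pre.length - 1 < pre.length)]
        rw [← List.getLast?_eq_getElem?]
        rw [pvLastEnd_getLast? pre 0 (0, 0, 0), if_neg hp0]
    rw [hget_p, hget_p1]
    simp only [Option.getD_some]
    rw [hprevterm]
    -- B side
    conv_rhs => rw [← hmot]
    rw [pvB_scan_skip ready dur pre ((cid, cs, ce) :: suf) 0 0 hallpre]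
    rw [pvB_scan, if_pos (show cs > ready by omega)]
    dsimp only
    simp only [Nat.zero_add]
    rw [max_comm (pvLastEnd pre 0) ready]
    by_cases hgap : cs - max ready (pvLastEnd pre 0) ≥ dur
    · rw [if_pos hgap, if_pos hgap]
    · rw [if_neg hgap, if_neg hgap]
      apply pv_loop_after ready dur _ pre.length suf (pre.length + 1) _ ce (by omega)
      · have he : pre ++ (tid, ready, ready + dur) :: (cid, cs, ce) :: suf
            = (pre ++ [(tid, ready, ready + dur), (cid, cs, ce)]) ++ suf := by simp
        have hl : (pre ++ [(tid, ready, ready + dur), (cid, cs, ce)]).length = pre.length + 1 + 1 := by simp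
        rw [he, ← hl, List.drop_left]
      · intro _
        have hc : ((pre.length + 1 : Nat) : Int) = ((pre.length : Nat) : Int) + 1 := by push_cast; ring
        rw [hc, hget_p1]
        rfl
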